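-- pv_equiv track=rewrite | github.com/redlizzxy/EnvMeta | envmeta/geocycle/cell_renderer.py | _bundle_label
-- ===== SOURCE A (Python) =====
-- from typing import Any
--
-- def _bundle_label(steps: list[dict[str, Any]]) -> str:
--     """对多基因 bundle 生成短标签，不截断。
--
--     启发式：
--     - 所有名字共享同一 3+ 字符前缀 → 前缀保留 + 各自后缀拼 '/'
--       narG/narH/narI → narG/H/I
--     - 否则全拼 'aprA/aprB/dsrA/dsrB'（无截断，靠 _draw_bundle_ellipse 自适应宽度）
--     """
--     names = [s.get("gene") or s.get("ko") or "?" for s in steps]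
--     if len(names) == 1:
--         return names[0]
--     pref = _common_prefix(names)
--     if len(pref) >= 3 and all(len(n) > len(pref) for n in names):
--         tails = [n[len(pref):] for n in names]
--         return pref + "/".join(tails)
--     return "/".join(names)
--
-- def _common_prefix(names: list[str]) -> str:
--     if not names:
--         return ""
--     pref = names[0]
--     for n in names[1:]:
--         while not n.startswith(pref):
--             pref = pref[:-1]
--             if not pref:
--                 return ""
--     return pref
-- ===== SOURCE B (Python) =====
-- def _bundle_label(steps):
--     """Column-wise common-prefix scan (zip over positions) instead of per-name startswith shrinking."""
--     names = [s.get("gene") or s.get("ko") or "?" for s in steps]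
--     if len(names) == 1:
--         return names[0]
--     pref_chars = []
--     for col in zip(*names):
--         if any(c != col[0] for c in col[1:]):
--             break
--         pref_chars.append(col[0])
--     pref = "".join(pref_chars)
--     if len(pref) >= 3 and all(len(n) > len(pref) for n in names):
--         return pref + "/".join(n[len(pref):] for n in names)
--     return "/".join(names)
-- ===== Notes on version B (the rewrite author's own statement) =====
-- stated objective: alternative
-- what changed: The longest common prefix is computed by a single column-wise scan across all names at once (zip over character positions) instead of A's per-name loop that repeatedly shrinks a candidate prefix with startswith; the labelling logic around it is unchanged.
import Mathlib
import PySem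

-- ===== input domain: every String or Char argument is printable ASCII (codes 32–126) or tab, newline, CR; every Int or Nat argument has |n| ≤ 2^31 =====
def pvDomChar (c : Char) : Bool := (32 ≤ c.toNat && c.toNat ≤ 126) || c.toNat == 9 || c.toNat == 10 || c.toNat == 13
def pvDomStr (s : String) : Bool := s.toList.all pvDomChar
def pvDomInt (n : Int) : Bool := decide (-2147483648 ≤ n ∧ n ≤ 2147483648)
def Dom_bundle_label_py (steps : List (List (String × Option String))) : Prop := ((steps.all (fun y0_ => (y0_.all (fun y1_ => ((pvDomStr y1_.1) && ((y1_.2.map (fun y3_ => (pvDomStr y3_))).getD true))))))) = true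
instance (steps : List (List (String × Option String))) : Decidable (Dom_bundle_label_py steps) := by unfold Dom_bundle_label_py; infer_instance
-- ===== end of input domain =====

-- B computes the common prefix by one column-wise scan across all names instead of A's
-- per-name startswith-shrinking loop; the surrounding labelling logic is identical (alternative).

-- shared by both ports: `s.get("gene") or s.get("ko") or "?"` (Python `or`: None and "" are falsy)
def pvOrStr (o : Option String) (d : String) : String :=
  match o with
  | some v => if v = "" then d else v
  | none => d

def pvNameOf (s : List (String × Option String)) : String :=
  pvOrStr (((PySem.Dict.mk s).get? "gene").join) (pvOrStr (((PySem.Dict.mk s).get? "ko").join) "?")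

-- ===== PORT A =====
-- the `while not n.startswith(pref)` loop; `none` = the early `return ""` inside it
def pvShrink (n : List Char) (pref : List Char) : Option (List Char) :=
  if PySem.Chars.startswith n pref then some pref
  else
    let p := pref.dropLast
    if p = [] then none else pvShrink n p
termination_by pref.length
decreasing_by
  have hne : pref ≠ [] := by
    intro he
    subst he
    simp [PySem.Chars.startswith_iff] at *
  simp only [List.length_dropLast]
  have := List.length_pos_iff.mpr hne
  omega

-- the `for n in names[1:]` loop of _common_prefix
def pvCPGo (pref : List Char) : List (List Char) → List Char
  | [] => pref
  | n :: ns =>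
    match pvShrink n pref with
    | none => []
    | some p => pvCPGo p ns

def pvCommonPrefix (names : List (List Char)) : List Char :=
  match names with
  | [] => []
  | n0 :: rest => pvCPGo n0 rest

def bundle_label_py (steps : List (List (String × Option String))) : String :=
  let names := steps.map pvNameOf
  if names.length == 1 then names.headD ""
  else
    let pref := pvCommonPrefix (names.map String.toList)
    if 3 ≤ pref.length ∧ names.all (fun n => pref.length < n.toList.length) then
      String.ofList (pref ++ PySem.Chars.join ['/'] (names.map (fun n => n.toList.drop pref.length)))
    else
      String.ofList (PySem.Chars.join ['/'] (names.map String.toList))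

-- ===== PORT B =====
-- the `for col in zip(*names)` column scan: column i exists iff every name still has a
-- character there (zip stops at the shortest name), and it extends the prefix iff all
-- its characters equal the first name's character
def pvColGo (n0 : List Char) (rest : List (List Char)) : List Char :=
  match n0 with
  | [] => []
  | c :: cs =>
    if rest.all (fun n => n.head? == some c) then
      c :: pvColGo cs (rest.map (List.drop 1))
    else []

def pvLcpB : List (List Char) → List Char
  | [] => []
  | n0 :: rest => pvColGo n0 rest

def bundle_label_py_alt (steps : List (List (String × Option String))) : String :=
  let names := steps.map pvNameOf
  if names.length == 1 then names.headD ""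
  else
    let pref := pvLcpB (names.map String.toList)
    if 3 ≤ pref.length ∧ names.all (fun n => pref.length < n.toList.length) then
      String.ofList (pref ++ PySem.Chars.join ['/'] (names.map (fun n => n.toList.drop pref.length)))
    else
      String.ofList (PySem.Chars.join ['/'] (names.map String.toList))

-- ===== PRECONDITION & SPEC =====
def Spec_bundle_label_py (steps : List (List (String × Option String))) (out : String) : Prop := out = bundle_label_py_alt steps
instance (steps : List (List (String × Option String))) (out : String) : Decidable (Spec_bundle_label_py steps out) := by unfold Spec_bundle_label_py; infer_instance

-- ===== CLAIM (what is proved, stated in full; the proofs are below) =====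
def Claim_equal_bundle_label_py : Prop := ∀ (steps : List (List (String × Option String))), Dom_bundle_label_py steps → Spec_bundle_label_py steps (bundle_label_py steps)

-- ===== LEMMAS AND PROOFS =====

-- two-string longest common prefix, the common characterisation of both loops
def pvLcp2 : List Char → List Char → List Char
  | x :: a, y :: b => if x = y then x :: pvLcp2 a b else []
  | _, _ => []

theorem pvLcp2_nil_right (a : List Char) : pvLcp2 a [] = [] := by
  cases a <;> rfl

theorem pvLcp2_of_prefix {a b : List Char} (h : a <+: b) : pvLcp2 a b = a := by
  induction a generalizing b with
  | nil => cases b <;> rfl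
  | cons x a ih =>
    cases b with
    | nil => simp at h
    | cons y b =>
      rcases List.cons_prefix_cons.mp h with ⟨rfl, h2⟩
      simp [pvLcp2, ih h2]

theorem pvLcp2_dropLast {a n : List Char} (h : ¬ a <+: n) :
    pvLcp2 a.dropLast n = pvLcp2 a n := by
  induction a generalizing n with
  | nil => exact absurd (List.nil_prefix) h
  | cons c cs ih =>
    cases n with
    | nil => simp [pvLcp2_nil_right]
    | cons d ds =>
      by_cases hcd : c = d
      · subst hcd
        have hcs : ¬ cs <+: ds := fun hp => h (List.cons_prefix_cons.mpr ⟨rfl, hp⟩)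
        have hcsne : cs ≠ [] := by
          intro he; subst he; exact hcs List.nil_prefix
        cases cs with
        | nil => exact absurd rfl hcsne
        | cons e es =>
          simp only [List.dropLast_cons₂, pvLcp2]
          have := ih (n := ds) hcs
          
          rw [← this]
      · cases cs with
        | nil => simp [pvLcp2, List.dropLast, hcd]
        | cons e es =>
          simp [List.dropLast_cons₂, pvLcp2, hcd]

theorem pvShrink_eq (n pref : List Char) :
    pvShrink n pref = if pvLcp2 pref n = [] ∧ pref ≠ [] then none else some (pvLcp2 pref n) := by
  fun_induction pvShrink n pref with
  | case1 pref hsw =>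
    have hp : pref <+: n := (PySem.Chars.startswith_iff n pref).mp hsw
    rw [pvLcp2_of_prefix hp]
    by_cases he : pref = []
    · simp [he]
    · simp [he]
  | case2 pref hsw p hnil =>
    have hnp : ¬ pref <+: n := fun hp => hsw ((PySem.Chars.startswith_iff n pref).mpr hp)
    have hpne : pref ≠ [] := by
      intro he; subst he; exact hnp List.nil_prefix
    have hlcp : pvLcp2 pref n = [] := by
      have h1 := pvLcp2_dropLast hnp
      rw [show pref.dropLast = p from rfl, hnil] at h1
      have h0 : pvLcp2 ([] : List Char) n = [] := by cases n <;> rfl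
      rw [h0] at h1
      exact h1.symm
    simp [hlcp, hpne]
  | case3 pref hsw p hnil ih =>
    have hnp : ¬ pref <+: n := fun hp => hsw ((PySem.Chars.startswith_iff n pref).mpr hp)
    have hpne : pref ≠ [] := by
      intro he; subst he; exact hnp List.nil_prefix
    have hl : pvLcp2 p n = pvLcp2 pref n := by
      rw [show p = pref.dropLast from rfl]; exact pvLcp2_dropLast hnp
    rw [ih, hl]
    simp [hpne, hnil]

theorem pvCPGo_nil (ns : List (List Char)) : pvCPGo [] ns = [] := by
  induction ns with
  | nil => rfl
  | cons n ns ih =>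
    have h : pvShrink n [] = some [] := by
      rw [pvShrink_eq]; simp [pvLcp2]
    simp [pvCPGo, h, ih]

theorem pvCPGo_step (pref n : List Char) (ns : List (List Char)) :
    pvCPGo pref (n :: ns) = pvCPGo (pvLcp2 pref n) ns := by
  simp only [pvCPGo, pvShrink_eq]
  split_ifs with h
  · rw [h.1, pvCPGo_nil]
  · rfl

theorem pvColGo_nil (pref : List Char) : pvColGo pref [] = pref := by
  induction pref with
  | nil => rfl
  | cons c cs ih => simp [pvColGo, ih]

theorem pvColGo_step (pref n : List Char) (ns : List (List Char)) :
    pvColGo pref (n :: ns) = pvColGo (pvLcp2 pref n) ns := by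
  induction pref generalizing n ns with
  | nil => simp [pvColGo, pvLcp2]
  | cons c cs ih =>
    cases n with
    | nil =>
      simp [pvColGo, pvLcp2]
    | cons d ds =>
      by_cases hcd : c = d
      · subst hcd
        simp only [pvColGo, pvLcp2, List.all_cons, List.head?_cons,
          beq_self_eq_true, Bool.true_and, List.map_cons, List.drop_one, List.tail_cons]
        conv_rhs => rw [pvColGo.eq_def]
        by_cases hall : ns.all (fun m => m.head? == some c)
        · simp [hall, ih]
        · simp [hall]
      · simp [pvColGo, pvLcp2, hcd, Ne.symm hcd]

theorem pvGo_eq (ns : List (List Char)) (pref : List Char) :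
    pvCPGo pref ns = pvColGo pref ns := by
  induction ns generalizing pref with
  | nil => simp [pvCPGo, pvColGo_nil]
  | cons n ns ih => rw [pvCPGo_step, pvColGo_step, ih]

theorem pvPrefix_eq (names : List (List Char)) : pvCommonPrefix names = pvLcpB names := by
  cases names with
  | nil => rfl
  | cons n0 rest => simp [pvCommonPrefix, pvLcpB, pvGo_eq]

-- ===== VERDICT (by name: the statement is the Claim_ definition above) =====
theorem bundle_label_py_spec : Claim_equal_bundle_label_py := by
  intro steps _
  unfold Spec_bundle_label_py bundle_label_py bundle_label_py_alt
  simp only [pvPrefix_eq]
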